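-- pv_equiv track=rewrite | github.com/shlapolosa/health-service-idp | microservices/streamlit-frontend/components/chat.py | _determine_agent_type
-- ===== SOURCE A (Python) =====
-- def _determine_agent_type(user_input: str) -> str:
--     """Determine which agent type should handle the request"""
--     user_input_lower = user_input.lower()
--
--     if any(keyword in user_input_lower for keyword in ["business", "process", "stakeholder", "requirement"]):
--         return "Business Analyst"
--     elif any(keyword in user_input_lower for keyword in ["strategy", "capability", "value"]):
--         return "Business Architect"
--     elif any(keyword in user_input_lower for keyword in ["application", "software", "service", "api"]):
--         return "Application Architect"
--     elif any(keyword in user_input_lower for keyword in ["infrastructure", "cloud", "deployment", "server"]):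
--         return "Infrastructure Architect"
--     elif any(keyword in user_input_lower for keyword in ["solution", "integration", "pattern"]):
--         return "Solution Architect"
--     elif any(keyword in user_input_lower for keyword in ["project", "timeline", "resource"]):
--         return "Project Manager"
--     elif any(keyword in user_input_lower for keyword in ["code", "implement", "develop"]):
--         return "Developer"
--     else:
--         return "Architecture Assistant"
-- ===== SOURCE B (Python) =====
-- # Build the answer back-to-front: scan a flat (keyword, label) list in REVERSE
-- # priority order with a last-write-wins accumulator; the final overwrite comes
-- # from the highest-priority matching group. No branch chain, no early return,
-- # no priority comparison.
-- _REVERSED_KEYWORDS = [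
--     ("develop", "Developer"), ("implement", "Developer"), ("code", "Developer"),
--     ("resource", "Project Manager"), ("timeline", "Project Manager"), ("project", "Project Manager"),
--     ("pattern", "Solution Architect"), ("integration", "Solution Architect"), ("solution", "Solution Architect"),
--     ("server", "Infrastructure Architect"), ("deployment", "Infrastructure Architect"),
--     ("cloud", "Infrastructure Architect"), ("infrastructure", "Infrastructure Architect"),
--     ("api", "Application Architect"), ("service", "Application Architect"),
--     ("software", "Application Architect"), ("application", "Application Architect"),
--     ("value", "Business Architect"), ("capability", "Business Architect"), ("strategy", "Business Architect"),
--     ("requirement", "Business Analyst"), ("stakeholder", "Business Analyst"),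
--     ("process", "Business Analyst"), ("business", "Business Analyst"),
-- ]
--
--
-- def _determine_agent_type(user_input: str) -> str:
--     s = user_input.lower()
--     agent = "Architecture Assistant"
--     for keyword, label in _REVERSED_KEYWORDS:
--         if keyword in s:
--             agent = label
--     return agent
-- ===== Notes on version B (the rewrite author's own statement) =====
-- stated objective: alternative
-- what changed: Replaced the prioritized if/elif chain of any()-scans with a back-to-front pass: a flat (keyword,label) list in reverse priority order is scanned once with a last-write-wins accumulator, so the highest-priority matching group writes last; no branching chain, no early return, no priority comparison.
import Mathlib
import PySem

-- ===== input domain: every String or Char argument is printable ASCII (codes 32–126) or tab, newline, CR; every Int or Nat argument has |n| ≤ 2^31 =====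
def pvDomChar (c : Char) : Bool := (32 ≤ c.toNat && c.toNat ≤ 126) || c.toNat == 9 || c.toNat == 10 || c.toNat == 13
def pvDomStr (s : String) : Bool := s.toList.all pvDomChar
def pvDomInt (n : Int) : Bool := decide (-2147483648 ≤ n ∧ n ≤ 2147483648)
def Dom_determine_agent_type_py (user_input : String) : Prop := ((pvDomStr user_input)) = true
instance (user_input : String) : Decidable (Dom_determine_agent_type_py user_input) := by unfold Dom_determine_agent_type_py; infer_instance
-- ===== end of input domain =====

-- B replaces A's if/elif chain by one back-to-front scan of a flat (keyword,label) list in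
-- reverse priority order with a last-write-wins accumulator; alternative structure, same cost.

-- ===== PORT A =====
def determine_agent_type_py (user_input : String) : String :=
  let s := PySem.Str.lower user_input
  if (["business", "process", "stakeholder", "requirement"].any (fun k => PySem.Str.isIn k s)) then
    "Business Analyst"
  else if (["strategy", "capability", "value"].any (fun k => PySem.Str.isIn k s)) then
    "Business Architect"
  else if (["application", "software", "service", "api"].any (fun k => PySem.Str.isIn k s)) then
    "Application Architect"
  else if (["infrastructure", "cloud", "deployment", "server"].any (fun k => PySem.Str.isIn k s)) then
    "Infrastructure Architect"
  else if (["solution", "integration", "pattern"].any (fun k => PySem.Str.isIn k s)) then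
    "Solution Architect"
  else if (["project", "timeline", "resource"].any (fun k => PySem.Str.isIn k s)) then
    "Project Manager"
  else if (["code", "implement", "develop"].any (fun k => PySem.Str.isIn k s)) then
    "Developer"
  else
    "Architecture Assistant"

-- ===== PORT B =====
def pvReversedKeywords : List (String × String) :=
  [("develop", "Developer"), ("implement", "Developer"), ("code", "Developer"),
   ("resource", "Project Manager"), ("timeline", "Project Manager"), ("project", "Project Manager"),
   ("pattern", "Solution Architect"), ("integration", "Solution Architect"), ("solution", "Solution Architect"),
   ("server", "Infrastructure Architect"), ("deployment", "Infrastructure Architect"),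
   ("cloud", "Infrastructure Architect"), ("infrastructure", "Infrastructure Architect"),
   ("api", "Application Architect"), ("service", "Application Architect"),
   ("software", "Application Architect"), ("application", "Application Architect"),
   ("value", "Business Architect"), ("capability", "Business Architect"), ("strategy", "Business Architect"),
   ("requirement", "Business Analyst"), ("stakeholder", "Business Analyst"),
   ("process", "Business Analyst"), ("business", "Business Analyst")]

def determine_agent_type_py_alt (user_input : String) : String :=
  let s := PySem.Str.lower user_input
  pvReversedKeywords.foldl
    (fun agent e => if PySem.Str.isIn e.1 s then e.2 else agent)
    "Architecture Assistant"

-- ===== PRECONDITION & SPEC =====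
def Spec_determine_agent_type_py (user_input : String) (out : String) : Prop := out = determine_agent_type_py_alt user_input
instance (user_input : String) (out : String) : Decidable (Spec_determine_agent_type_py user_input out) := by unfold Spec_determine_agent_type_py; infer_instance

-- ===== CLAIM (what is proved, stated in full; the proofs are below) =====
def Claim_equal_determine_agent_type_py : Prop := ∀ (user_input : String), Dom_determine_agent_type_py user_input → Spec_determine_agent_type_py user_input (determine_agent_type_py user_input)

-- ===== LEMMAS AND PROOFS =====

-- Folding a same-label keyword group: the result is the label if any keyword matches, else the
-- incoming accumulator.
theorem pv_fold_group (s : String) (ks : List String) (lbl acc : String) :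
    (ks.map (fun k => (k, lbl))).foldl
      (fun agent e => if PySem.Str.isIn e.1 s then e.2 else agent) acc =
    if ks.any (fun k => PySem.Str.isIn k s) then lbl else acc := by
  induction ks generalizing acc with
  | nil => rfl
  | cons k t ih =>
    by_cases hk : PySem.Str.isIn k s = true
    · simp only [List.map_cons, List.foldl_cons, List.any_cons, hk, Bool.true_or, if_true, ih]
      split <;> rfl
    · have hk' : PySem.Str.isIn k s = false := Bool.eq_false_iff.mpr hk
      simp only [List.map_cons, List.foldl_cons, List.any_cons, hk', Bool.false_or, ih]
      simp

-- The reversed flat list is the concatenation of the seven groups, lowest priority first,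
-- each group's keywords reversed.
theorem pv_rev_table_eq : pvReversedKeywords =
    (["code", "implement", "develop"].reverse.map (fun k => (k, "Developer"))) ++
    (["project", "timeline", "resource"].reverse.map (fun k => (k, "Project Manager"))) ++
    (["solution", "integration", "pattern"].reverse.map (fun k => (k, "Solution Architect"))) ++
    (["infrastructure", "cloud", "deployment", "server"].reverse.map (fun k => (k, "Infrastructure Architect"))) ++
    (["application", "software", "service", "api"].reverse.map (fun k => (k, "Application Architect"))) ++
    (["strategy", "capability", "value"].reverse.map (fun k => (k, "Business Architect"))) ++
    (["business", "process", "stakeholder", "requirement"].reverse.map (fun k => (k, "Business Analyst"))) := by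
  rfl

-- ===== VERDICT (by name: the statement is the Claim_ definition above) =====
theorem determine_agent_type_py_spec : Claim_equal_determine_agent_type_py := by
  intro user_input _
  unfold Spec_determine_agent_type_py determine_agent_type_py determine_agent_type_py_alt
  set s := PySem.Str.lower user_input with hs
  rw [pv_rev_table_eq]
  simp only [List.foldl_append, pv_fold_group, List.any_reverse]
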